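-- pv_equiv track=rewrite | github.com/thongdhv1010/GapoTest | GapoTest/lession_1.py | sub_math
-- ===== SOURCE A (Python) =====
-- def sub_math(math):
--     """
--         Type: 1: Toán tử, 2: biến
--     :param math:
--     :return:
--     """
--     list_math = ['+', '-', '*', '/', '(', ')']
--     i = 0
--     k = 1
--     point = ''
--     math_temp = math
--     if math[i] in list_math:
--         while k <= len(math):
--             if k < len(math):
--                 if math_temp[k] not in list_math:
--                     point = math[i:k]
--                     math = math[k:len(math_temp)]
--                     break
--                 k += 1
--             else:
--                 point = math[i:k]
--                 math = ''
--         type = 1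
--     else:
--         while k <= len(math):
--             if k < len(math):
--                 if math_temp[k] in list_math:
--                     point = math[i:k]
--                     math = math[k:len(math_temp)]
--                     break
--                 k += 1
--             else:
--                 point = math[i:k]
--                 math = ''
--         type = 2
--     return point, math, type
-- ===== SOURCE B (Python) =====
-- import re
--
-- _OPS = set('+-*/()')
-- _OP_RUN = re.compile(r'[-+*/()]+')
-- _VAR_RUN = re.compile(r'[^-+*/()]+')
--
--
-- def sub_math(math):
--     if math[0] in _OPS:
--         pattern, type = _OP_RUN, 1
--     else:
--         pattern, type = _VAR_RUN, 2
--     point = pattern.match(math).group()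
--     return point, math[len(point):], type
-- ===== Notes on version B (the rewrite author's own statement) =====
-- stated objective: idiomatic
-- what changed: Replaces the explicit index-walking while loop with its two duplicated break-on-class branches by a single anchored regex character-class match ([-+*/()]+ or [^-+*/()]+) whose matched group is the token and whose length gives the remainder slice. (the scan runs inside the C regex engine instead of a per-character Python loop)
import Mathlib
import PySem

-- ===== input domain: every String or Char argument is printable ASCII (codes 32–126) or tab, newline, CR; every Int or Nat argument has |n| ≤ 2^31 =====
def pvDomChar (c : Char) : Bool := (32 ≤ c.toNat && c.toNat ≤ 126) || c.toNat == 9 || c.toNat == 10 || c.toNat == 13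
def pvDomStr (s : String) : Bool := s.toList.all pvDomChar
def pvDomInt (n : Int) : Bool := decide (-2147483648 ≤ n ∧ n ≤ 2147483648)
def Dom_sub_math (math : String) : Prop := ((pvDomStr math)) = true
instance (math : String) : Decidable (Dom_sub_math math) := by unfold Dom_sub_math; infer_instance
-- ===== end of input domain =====

-- B replaces A's index-walking while loop (duplicated for the two branches) with a single
-- anchored regex character-class run (ported as takeWhile); objective: idiomatic, same behaviour.

-- ===== PORT A =====
-- A's while loop: k walks from its start position over math_temp; breaks when brk holds at
-- math_temp[k], yielding (math[0:k], math[k:]); if k reaches len(math), yields (math, '').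
def subLoopA (brk : Char → Bool) (mt : List Char) (k : Nat) : List Char × List Char :=
  if h : k < mt.length then
    if brk mt[k] then (mt.take k, mt.drop k) else subLoopA brk mt (k + 1)
  else (mt, [])
termination_by mt.length - k

def sub_math (math : String) : String × String × Int :=
  let listMath : List Char := ['+', '-', '*', '/', '(', ')']
  let mt := math.toList
  -- math[0]; total via a default — Pre_sub_math excludes the empty string, where Python raises IndexError
  let c0 := PySem.List.pyGetD mt 0 ' '
  if listMath.contains c0 then
    let pr := subLoopA (fun c => ! listMath.contains c) mt 1
    (String.ofList pr.1, String.ofList pr.2, 1)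
  else
    let pr := subLoopA (fun c => listMath.contains c) mt 1
    (String.ofList pr.1, String.ofList pr.2, 2)

-- ===== PORT B =====
def sub_math_alt (math : String) : String × String × Int :=
  let ops : List Char := "+-*/()".toList
  let mt := math.toList
  -- branch on the first character, then one anchored character-class run:
  -- re.match of '[-+*/()]+' resp. '[^-+*/()]+' = takeWhile of the class; remainder = math[len(point):]
  let c0 := PySem.List.pyGetD mt 0 ' '
  let t : Int := if ops.contains c0 then 1 else 2
  let pred : Char → Bool := if ops.contains c0 then (fun c => ops.contains c) else (fun c => ! ops.contains c)
  let point := mt.takeWhile pred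
  (String.ofList point, String.ofList (mt.drop point.length), t)

-- ===== PRECONDITION & SPEC =====
-- Pre_ excludes only the empty string, on which both Pythons raise IndexError at math[0].
def Pre_sub_math (math : String) : Prop := math ≠ ""
instance (math : String) : Decidable (Pre_sub_math math) := by unfold Pre_sub_math; infer_instance
def pvWitness_sub_math : String := "a+b"

def Spec_sub_math (math : String) (out : String × String × Int) : Prop := out = sub_math_alt math
instance (math : String) (out : String × String × Int) : Decidable (Spec_sub_math math out) := by unfold Spec_sub_math; infer_instance

-- ===== CLAIM (what is proved, stated in full; the proofs are below) =====
def Claim_equal_sub_math : Prop := ∀ (math : String), Dom_sub_math math → Pre_sub_math math → Spec_sub_math math (sub_math math)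

-- ===== LEMMAS AND PROOFS =====

-- A's loop (break test brk = the negation of the class pred), started after a prefix of
-- characters satisfying pred, computes the takeWhile/dropWhile split.
theorem subLoopA_spec (brk pred : Char → Bool) (hbrk : ∀ c, brk c = ! pred c)
    (pre rest : List Char) (hpre : ∀ c ∈ pre, pred c = true) :
    subLoopA brk (pre ++ rest) pre.length
      = (pre ++ rest.takeWhile pred, rest.dropWhile pred) := by
  induction rest generalizing pre with
  | nil =>
      rw [subLoopA]
      simp
  | cons c rs ih =>
      rw [subLoopA]
      have hlt : pre.length < (pre ++ c :: rs).length := by simp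
      have hget : (pre ++ c :: rs)[pre.length]'hlt = c := by simp
      rw [dif_pos hlt]
      simp only [hget, hbrk]
      by_cases hc : pred c = true
      · rw [if_neg (by simp [hc])]
        have := ih (pre ++ [c]) (by
          intro x hx
          rcases List.mem_append.mp hx with h | h
          · exact hpre x h
          · simp only [List.mem_singleton] at h; subst h; exact hc)
        simpa [List.takeWhile_cons, List.dropWhile_cons, hc] using this
      · have hc' : pred c = false := by simpa using hc
        rw [if_pos (by simp [hc'])]
        simp [hc', List.take_left', List.drop_left']

-- dropping the matched length equals dropWhile (aligns B's remainder slice with A's)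
theorem drop_length_takeWhile (pred : Char → Bool) (l : List Char) :
    l.drop (l.takeWhile pred).length = l.dropWhile pred := by
  induction l with
  | nil => rfl
  | cons c cs ih =>
      by_cases h : pred c = true
      · simp [List.takeWhile_cons_of_pos h, List.dropWhile_cons_of_pos h, ih]
      · have h' : pred c = false := by simpa using h
        simp [List.takeWhile_cons_of_neg, List.dropWhile_cons_of_neg, h']

theorem sub_math_spec : Claim_equal_sub_math := by
  intro math _ hpre
  unfold Spec_sub_math sub_math sub_math_alt
  have hne : math.toList ≠ [] := fun h => hpre (String.toList_eq_nil_iff.mp h)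
  obtain ⟨c, cs, hcs⟩ := List.exists_cons_of_ne_nil hne
  rw [hcs]
  have hops : ("+-*/()".toList : List Char) = ['+', '-', '*', '/', '(', ')'] := by decide
  rw [hops]
  set L : List Char := ['+', '-', '*', '/', '(', ')'] with hL
  simp only [PySem.List.pyGetD_zero_cons]
  by_cases hc : L.contains c = true
  · -- operator branch: pred = (L.contains ·)
    have hloop := subLoopA_spec (fun x => ! L.contains x) (fun x => L.contains x)
      (fun x => rfl) [c] cs (by simpa using hc)
    simp only [List.length_cons, List.length_nil, List.singleton_append] at hloop
    rw [if_pos hc, if_pos hc, if_pos hc, hloop, drop_length_takeWhile,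
        List.dropWhile_cons_of_pos hc, List.takeWhile_cons_of_pos hc]
  · have hm : c ∉ L := by simpa using hc
    have hloop := subLoopA_spec (fun x => L.contains x) (fun x => ! L.contains x)
      (fun x => by simp) [c] cs (by simp [hm])
    simp only [List.length_cons, List.length_nil, List.singleton_append] at hloop
    rw [if_neg hc, if_neg hc, if_neg hc, hloop, drop_length_takeWhile]
    simp [hm]
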